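-- pv_equiv track=rewrite | github.com/NM20XX/Python | Misc_string_operations.py | letter_replace
-- ===== SOURCE A (Python) =====
-- def letter_replace(str):
--
--     from string import ascii_letters
--
--     replace_str=''
--     for c in str:
--      if c in ascii_letters:
--         replace_str = replace_str + ascii_letters[(ascii_letters.index(c)+1)%len(ascii_letters)] #modulo to roll around to the beginning of the string as that will return 0
--      else:
--         replace_str = replace_str + c
--
--
--     vowel = ['A','E','I','O','U','a','e','i','o','u']
--     for i in replace_str:
--         if i in vowel:
--             replace_str = replace_str.replace(i,i.upper())
--
--
--     return replace_str
-- ===== SOURCE B (Python) =====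
-- def letter_replace(str):
--     from string import ascii_letters
--     table = {}
--     for i, ch in enumerate(ascii_letters):
--         shifted = ascii_letters[(i + 1) % len(ascii_letters)]
--         table[ord(ch)] = shifted.upper() if shifted in 'AEIOUaeiou' else shifted
--     return str.translate(table)
-- ===== Notes on version B (the rewrite author's own statement) =====
-- stated objective: faster
-- what changed: B builds a 52-entry ord->char translation table once (each letter mapped to its successor in ascii_letters, vowels pre-uppercased) and applies it in a single str.translate pass, replacing A's per-character index search plus a second loop of whole-string .replace scans.
import Mathlib
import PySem

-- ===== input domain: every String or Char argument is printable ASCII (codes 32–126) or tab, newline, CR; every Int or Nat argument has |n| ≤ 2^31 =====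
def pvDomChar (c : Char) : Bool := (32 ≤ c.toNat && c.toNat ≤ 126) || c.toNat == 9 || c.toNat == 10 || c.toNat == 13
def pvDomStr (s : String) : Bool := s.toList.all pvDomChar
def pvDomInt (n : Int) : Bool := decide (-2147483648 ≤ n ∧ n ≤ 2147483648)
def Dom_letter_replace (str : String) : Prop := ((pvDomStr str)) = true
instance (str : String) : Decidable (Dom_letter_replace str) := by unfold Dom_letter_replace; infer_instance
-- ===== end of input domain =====

-- B replaces A's per-character index-search shift plus repeated whole-string .replace scans by a
-- 52-entry translation table built once and a single str.translate pass (objective: faster).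

-- string.ascii_letters
def pvLetters : List Char := "abcdefghijklmnopqrstuvwxyzABCDEFGHIJKLMNOPQRSTUVWXYZ".toList

def pvVowelList : List Char := ['A', 'E', 'I', 'O', 'U', 'a', 'e', 'i', 'o', 'u']

-- ===== PORT A =====
def letter_replace (str : String) : String :=
  -- first loop: shift every ascii letter to the next one (wrapping), keep other chars
  let r1 : List Char := str.toList.foldl (fun acc c =>
    if pvLetters.contains c then
      -- ascii_letters[(ascii_letters.index(c)+1) % len(ascii_letters)]: the membership guard
      -- makes index? a some and the modulo keeps the index in range, so the getD defaults are unreachable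
      acc ++ [pvLetters.getD (((PySem.List.index? pvLetters c).getD 0 + 1) % pvLetters.length) c]
    else
      acc ++ [c]) []
  -- second loop: iterate over the shifted string, uppercasing every vowel via str.replace
  -- (Python's `for i in replace_str` iterates the string object bound at loop entry, r1)
  let r2 : List Char := r1.foldl (fun acc i =>
    if pvVowelList.contains i then PySem.Chars.replace acc [i] (PySem.Chars.upper [i]) else acc) r1
  String.ofList r2

-- ===== PORT B =====
-- shifted.upper() if shifted in 'AEIOUaeiou' else shifted, where
-- shifted = ascii_letters[(i + 1) % len(ascii_letters)] (the index is always in range,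
-- so pyGetD's default is unreachable)
def pvTableVal (p : Int × Char) : Char :=
  if ("AEIOUaeiou".toList).contains
      (PySem.List.pyGetD pvLetters (PySem.Int.mod (p.1 + 1) (pvLetters.length : Int)) ' ') then
    PySem.Chars.upperChar
      (PySem.List.pyGetD pvLetters (PySem.Int.mod (p.1 + 1) (pvLetters.length : Int)) ' ')
  else
    PySem.List.pyGetD pvLetters (PySem.Int.mod (p.1 + 1) (pvLetters.length : Int)) ' '

-- the translation table: ord(letter) ↦ shifted letter, vowels already uppercased
def pvTable : PySem.Dict Int Char :=
  (PySem.List.enumerate pvLetters 0).foldl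
    (fun t p => t.insert ((p.2.toNat : Int)) (pvTableVal p)) PySem.Dict.empty

def letter_replace_alt (str : String) : String :=
  -- str.translate(table) ported by hand: every char is mapped through the table,
  -- chars whose ordinal is not a key are kept — exact for an ord→char table with no None/int values
  String.ofList (str.toList.map (fun c => (pvTable.get? ((c.toNat : Int))).getD c))

-- ===== PRECONDITION & SPEC =====
def Spec_letter_replace (str : String) (out : String) : Prop := out = letter_replace_alt str
instance (str : String) (out : String) : Decidable (Spec_letter_replace str out) := by unfold Spec_letter_replace; infer_instance

-- ===== CLAIM (what is proved, stated in full; the proofs are below) =====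
def Claim_equal_letter_replace : Prop := ∀ (str : String), Dom_letter_replace str → Spec_letter_replace str (letter_replace str)

-- ===== LEMMAS AND PROOFS =====

-- the per-character effect of A's first loop
def pvShift (c : Char) : Char :=
  if pvLetters.contains c then
    pvLetters.getD (((PySem.List.index? pvLetters c).getD 0 + 1) % pvLetters.length) c
  else c

-- the per-character effect of A's second loop
def pvUp (c : Char) : Char :=
  if pvVowelList.contains c then PySem.Chars.upperChar c else c

-- one step of A's second loop as a character substitution
def pvSubst (i y : Char) : Char :=
  if pvVowelList.contains i && y == i then PySem.Chars.upperChar i else y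

-- the combined effect of A's second loop on one character
def pvApply (m : List Char) (x : Char) : Char := m.foldl (fun y i => pvSubst i y) x

theorem pvChar_toNat_inj {c d : Char} (h : c.toNat = d.toNat) : c = d := by
  apply Char.ext
  exact UInt32.toNat_inj.mp h

-- single-character replace is a map
theorem pvReplace_go_single (c d : Char) : ∀ (fuel : Nat) (l acc : List Char), l.length ≤ fuel →
    PySem.Chars.replace.go [c] [d] fuel l acc
      = acc.reverse ++ l.map (fun x => if x = c then d else x) := by
  intro fuel
  induction fuel with
  | zero =>
    intro l acc h
    have : l = [] := List.eq_nil_of_length_eq_zero (Nat.le_zero.mp h)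
    subst this
    simp [PySem.Chars.replace.go]
  | succ n ih =>
    intro l acc h
    cases l with
    | nil => simp [PySem.Chars.replace.go]
    | cons x t =>
      rw [PySem.Chars.replace.go]
      by_cases hx : x = c
      · subst hx
        have hpre : List.isPrefixOf [x] (x :: t) = true := by simp [List.isPrefixOf]
        simp only [hpre, if_true]
        rw [ih _ _ (by simpa using Nat.lt_succ_iff.mp (Nat.lt_of_lt_of_le (Nat.lt_succ_self _) (by simpa using h)))]
        simp
      · have hpre : List.isPrefixOf [c] (x :: t) = false := by
          simp [List.isPrefixOf]
          intro hcx; exact absurd hcx.symm hx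
        simp only [hpre, Bool.false_eq_true, if_false]
        rw [ih _ _ (by simpa using h)]
        simp [hx]

theorem pvReplace_single (c d : Char) (l : List Char) :
    PySem.Chars.replace l [c] [d] = l.map (fun x => if x = c then d else x) := by
  simp only [PySem.Chars.replace, List.isEmpty_cons, Bool.false_eq_true, if_false]
  simpa using pvReplace_go_single c d l.length l [] (Nat.le_refl _)

-- A's second-loop step rewritten as a map
theorem pvStep_map (acc : List Char) (i : Char) :
    (if pvVowelList.contains i then PySem.Chars.replace acc [i] (PySem.Chars.upper [i]) else acc)
      = acc.map (pvSubst i) := by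
  by_cases hi : pvVowelList.contains i = true
  · rw [if_pos hi,
      show PySem.Chars.upper [i] = [PySem.Chars.upperChar i] from by simp [PySem.Chars.upper],
      pvReplace_single]
    have him : i ∈ pvVowelList := by simpa using hi
    refine List.map_congr_left (fun y _ => ?_)
    by_cases hyi : y = i
    · simp [pvSubst, hyi, him]
    · simp [pvSubst, hyi]
  · rw [if_neg hi]
    have hnm : i ∉ pvVowelList := by simpa using Bool.eq_false_iff.mpr hi
    have hfix : ∀ y, pvSubst i y = y := fun y => by simp [pvSubst, hnm]
    calc acc = acc.map id := (List.map_id acc).symm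
    _ = acc.map (pvSubst i) := List.map_congr_left (fun y _ => (hfix y).symm)

-- folding substitution steps over m is a single map by pvApply m
theorem pvFold_comp (m : List Char) : ∀ (acc : List Char),
    m.foldl (fun acc i =>
        if pvVowelList.contains i then PySem.Chars.replace acc [i] (PySem.Chars.upper [i]) else acc) acc
      = acc.map (pvApply m) := by
  induction m with
  | nil =>
    intro acc
    rw [List.foldl_nil]
    exact ((List.map_id acc).symm.trans (List.map_congr_left fun y _ => rfl))
  | cons i t ih =>
    intro acc
    rw [List.foldl_cons, pvStep_map, ih, List.map_map]
    rfl

-- characters that are not lowercase vowels are fixed by every substitution step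
theorem pvApply_fix (m : List Char) (y : Char)
    (hy : pvVowelList.contains y = false ∨ PySem.Chars.upperChar y = y) :
    pvApply m y = y := by
  induction m with
  | nil => rfl
  | cons i t ih =>
    have hstep : pvSubst i y = y := by
      unfold pvSubst
      split_ifs with h
      · simp only [Bool.and_eq_true, beq_iff_eq] at h
        obtain ⟨hiv, hyi⟩ := h
        subst hyi
        rcases hy with h1 | h1
        · rw [hiv] at h1; exact absurd h1 (by simp)
        · exact h1
      · rfl
    show pvApply t (pvSubst i y) = y
    rw [hstep]; exact ih

-- uppercasing a vowel is idempotent and all vowels are letters (finite checks)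
theorem pvVowel_upper (x : Char) (hx : x ∈ pvVowelList) :
    PySem.Chars.upperChar (PySem.Chars.upperChar x) = PySem.Chars.upperChar x := by
  fin_cases hx <;> decide

-- a vowel occurring in m ends up uppercased
theorem pvApply_mem (x : Char) (hx : pvVowelList.contains x = true) :
    ∀ (m : List Char), x ∈ m → pvApply m x = PySem.Chars.upperChar x := by
  intro m
  induction m with
  | nil => intro h; cases h
  | cons i t ih =>
    intro hmem
    show pvApply t (pvSubst i x) = PySem.Chars.upperChar x
    by_cases hix : i = x
    · have hstep : pvSubst i x = PySem.Chars.upperChar x := by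
        rw [hix]; simp [pvSubst, show x ∈ pvVowelList from by simpa using hx]
      rw [hstep]
      exact pvApply_fix t _ (Or.inr (pvVowel_upper x (by simpa using hx)))
    · have hxi : (x == i) = false := beq_eq_false_iff_ne.mpr (fun h => hix h.symm)
      have hstep : pvSubst i x = x := by simp [pvSubst, hxi]
      have hxt : x ∈ t := by
        rcases List.mem_cons.mp hmem with h | h
        · exact absurd h.symm hix
        · exact h
      rw [hstep]; exact ih hxt

-- combined: inside its own list, pvApply acts as pvUp
theorem pvApply_self (l : List Char) (x : Char) (hx : x ∈ l) : pvApply l x = pvUp x := by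
  by_cases hv : pvVowelList.contains x = true
  · rw [pvApply_mem x hv l hx]
    simp [pvUp, show x ∈ pvVowelList from by simpa using hv]
  · have hv' : pvVowelList.contains x = false := Bool.eq_false_iff.mpr hv
    rw [pvApply_fix l x (Or.inl hv')]
    simp [pvUp, show x ∉ pvVowelList from by simpa using hv']

-- A computes the per-character map pvUp ∘ pvShift
theorem pvA_eq_map (s : String) :
    letter_replace s = String.ofList ((s.toList.map pvShift).map pvUp) := by
  unfold letter_replace
  have h1 : s.toList.foldl (fun acc c =>
      if pvLetters.contains c then
        acc ++ [pvLetters.getD (((PySem.List.index? pvLetters c).getD 0 + 1) % pvLetters.length) c]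
      else acc ++ [c]) []
      = s.toList.map pvShift := by
    have : (fun (acc : List Char) (c : Char) =>
        if pvLetters.contains c then
          acc ++ [pvLetters.getD (((PySem.List.index? pvLetters c).getD 0 + 1) % pvLetters.length) c]
        else acc ++ [c]) = fun acc c => acc ++ [pvShift c] := by
      funext acc c
      unfold pvShift
      split_ifs <;> rfl
    rw [this, PySem.List.foldl_append_singleton_eq_map]
    simp
  simp only [h1, pvFold_comp]
  congr 1
  exact List.map_congr_left (fun x hx => pvApply_self _ x hx)

-- the table's keys (the letters' ordinals) are distinct
theorem pvEnumNodup :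
    ((PySem.List.enumerate pvLetters 0).map (fun p : Int × Char => ((p.2.toNat : Int)))).Nodup := by
  decide

theorem pvItems : pvTable.items
    = (PySem.List.enumerate pvLetters 0).map (fun p => (((p.2.toNat : Int)), pvTableVal p)) := by
  unfold pvTable
  rw [PySem.Dict.items_foldl_insert_fresh (PySem.List.enumerate pvLetters 0)
    (fun p : Int × Char => ((p.2.toNat : Int))) pvTableVal PySem.Dict.empty
    (fun a _ => PySem.Dict.contains_empty _) pvEnumNodup]
  simp [PySem.Dict.empty]

theorem pvKeys : pvTable.keys
    = (PySem.List.enumerate pvLetters 0).map (fun p : Int × Char => ((p.2.toNat : Int))) := by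
  simp only [PySem.Dict.keys, pvItems, List.map_map]
  rfl

theorem pvKeysNodup : pvTable.keys.Nodup := by
  rw [pvKeys]; exact pvEnumNodup

-- the stored value for each letter is exactly pvUp ∘ pvShift (finite check)
theorem pvVal_eq : ∀ p ∈ PySem.List.enumerate pvLetters 0, pvTableVal p = pvUp (pvShift p.2) := by
  decide

-- letters: the table agrees with pvUp ∘ pvShift
theorem pvTable_letter (c : Char) (hc : c ∈ pvLetters) :
    pvTable.get? ((c.toNat : Int)) = some (pvUp (pvShift c)) := by
  obtain ⟨j, hj, hcj⟩ := List.mem_iff_getElem.mp hc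
  have hp : (((j : Int)), c) ∈ PySem.List.enumerate pvLetters 0 := by
    rw [PySem.List.mem_enumerate_iff]
    exact ⟨j, hj, by simp [hcj]⟩
  have hm : (((c.toNat : Int)), pvTableVal (((j : Int)), c)) ∈ pvTable.items := by
    rw [pvItems]
    exact List.mem_map.mpr ⟨_, hp, rfl⟩
  rw [PySem.Dict.get?_of_mem_items _ hm pvKeysNodup, pvVal_eq _ hp]

theorem pvTable_none (c : Char) (hc : pvLetters.contains c = false) :
    pvTable.get? ((c.toNat : Int)) = none := by
  rw [PySem.Dict.get?_eq_none_iff_not_mem_keys, pvKeys]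
  intro hmem
  obtain ⟨p, hp, heq⟩ := List.mem_map.mp hmem
  rw [PySem.List.mem_enumerate_iff] at hp
  obtain ⟨k, hk, hpk⟩ := hp
  have hchar : p.2 = c := pvChar_toNat_inj (by exact_mod_cast heq)
  have : c ∈ pvLetters := by
    rw [← hchar, hpk]
    exact List.getElem_mem hk
  rw [List.contains_eq_mem] at hc
  simp [this] at hc

-- vowels are letters
theorem pvVowel_letter (c : Char) (hc : pvVowelList.contains c = true) :
    pvLetters.contains c = true := by
  have : c ∈ pvVowelList := by simpa using hc
  fin_cases this <;> decide

-- per-character agreement of the two programs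
theorem pvChar_eq (c : Char) :
    ((pvTable.get? ((c.toNat : Int))).getD c) = pvUp (pvShift c) := by
  by_cases hc : pvLetters.contains c = true
  · rw [pvTable_letter c (by simpa using hc), Option.getD_some]
  · have hc' : pvLetters.contains c = false := Bool.eq_false_iff.mpr hc
    rw [pvTable_none c hc']
    have hv : pvVowelList.contains c = false := by
      cases hcc : pvVowelList.contains c with
      | false => rfl
      | true => exact absurd (pvVowel_letter c hcc) (by simpa using hc')
    simp [pvShift, pvUp, show c ∉ pvLetters from by simpa using hc',
      show c ∉ pvVowelList from by simpa using hv]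

-- ===== VERDICT (by name: the statement is the Claim_ definition above) =====
set_option maxRecDepth 4000 in
theorem letter_replace_spec : Claim_equal_letter_replace := by
  intro s _
  unfold Spec_letter_replace
  rw [pvA_eq_map]
  unfold letter_replace_alt
  congr 1
  rw [List.map_map]
  exact List.map_congr_left (fun c _ => (pvChar_eq c).symm)
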